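-- pv_equiv track=rewrite | github.com/baothais/unit_testing | practice_python/practice4.py | get_xp
-- ===== SOURCE A (Python) =====
-- def get_xp(d):
--     sum_xp = 0
--     for key in d.keys():
--         if key == "Very Easy":
--             sum_xp += d[key] * 5
--         if key == "Easy":
--             sum_xp += d[key] * 10
--         if key == "Medium":
--             sum_xp += d[key] * 20
--         if key == "Hard":
--             sum_xp += d[key] * 40
--         if key == "Very Hard":
--             sum_xp += d[key] * 80
--     return f"{sum_xp}XP"
-- ===== SOURCE B (Python) =====
-- LEVELS = ["Very Easy", "Easy", "Medium", "Hard", "Very Hard"]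
--
-- def get_xp(d):
--     # Weights are 5*2^i along LEVELS, so the total is 5 * Horner evaluation
--     # of the counts at x = 2: c0 + 2*(c1 + 2*(c2 + 2*(c3 + 2*c4))).
--     def horner(levels):
--         if not levels:
--             return 0
--         return d.get(levels[0], 0) + 2 * horner(levels[1:])
--     return f"{5 * horner(LEVELS)}XP"
-- ===== Notes on version B (the rewrite author's own statement) =====
-- stated objective: alternative
-- what changed: B replaces A's key-walk with five weight branches by a recursive Horner evaluation: the weights are 5*2^i, so B recursively computes c0 + 2*(c1 + 2*(...)) over the ordered difficulty levels and multiplies once by 5 - no weight constants and no scan of d's keys.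
import Mathlib
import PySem

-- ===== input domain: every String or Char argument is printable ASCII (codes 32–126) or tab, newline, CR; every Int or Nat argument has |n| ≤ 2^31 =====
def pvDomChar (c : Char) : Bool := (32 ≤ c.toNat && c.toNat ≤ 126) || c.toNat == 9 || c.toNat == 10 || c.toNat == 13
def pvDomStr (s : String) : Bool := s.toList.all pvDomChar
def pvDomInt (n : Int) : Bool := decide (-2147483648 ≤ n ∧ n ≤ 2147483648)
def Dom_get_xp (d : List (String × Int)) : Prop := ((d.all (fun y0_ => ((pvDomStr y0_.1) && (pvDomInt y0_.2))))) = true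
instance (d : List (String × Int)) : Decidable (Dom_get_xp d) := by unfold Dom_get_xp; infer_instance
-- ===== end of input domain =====

-- B evaluates the counts by a recursive Horner scheme (weights are 5*2^i), instead of walking the dict's keys with five if-tests; same output.
-- ===== PORT A =====
-- d[key] is ported as getD _ 0: key is drawn from the dict's keys, so the Python lookup never raises.
def get_xp (d : List (String × Int)) : String :=
  let D := PySem.Dict.mk d
  let sum_xp : Int :=
    (PySem.List.dedup (d.map Prod.fst)).foldl (fun sum_xp key =>
      let sum_xp := if key = "Very Easy" then sum_xp + D.getD key 0 * 5 else sum_xp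
      let sum_xp := if key = "Easy" then sum_xp + D.getD key 0 * 10 else sum_xp
      let sum_xp := if key = "Medium" then sum_xp + D.getD key 0 * 20 else sum_xp
      let sum_xp := if key = "Hard" then sum_xp + D.getD key 0 * 40 else sum_xp
      let sum_xp := if key = "Very Hard" then sum_xp + D.getD key 0 * 80 else sum_xp
      sum_xp) 0
  PySem.Int.toStr sum_xp ++ "XP"

-- ===== PORT B =====
def pvLEVELS : List String := ["Very Easy", "Easy", "Medium", "Hard", "Very Hard"]

def pvHorner (d : List (String × Int)) : List String → Int
  | [] => 0
  | k :: t => (PySem.Dict.mk d).getD k 0 + 2 * pvHorner d t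

def get_xp_alt (d : List (String × Int)) : String :=
  PySem.Int.toStr (5 * pvHorner d pvLEVELS) ++ "XP"

-- ===== PRECONDITION & SPEC =====
def Spec_get_xp (d : List (String × Int)) (out : String) : Prop := out = get_xp_alt d
instance (d : List (String × Int)) (out : String) : Decidable (Spec_get_xp d out) := by unfold Spec_get_xp; infer_instance

-- ===== CLAIM (what is proved, stated in full; the proofs are below) =====
def Claim_equal_get_xp : Prop := ∀ (d : List (String × Int)), Dom_get_xp d → Spec_get_xp d (get_xp d)

-- ===== LEMMAS AND PROOFS =====

-- weight of a key in A's if-chain (0 for unknown keys)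
def pvW (k : String) : Int :=
  if k = "Very Easy" then 5 else if k = "Easy" then 10 else if k = "Medium" then 20
  else if k = "Hard" then 40 else if k = "Very Hard" then 80 else 0

theorem pvW_eq_zero {k : String} (h : k ∉ pvLEVELS) : pvW k = 0 := by
  simp [pvLEVELS] at h
  simp [pvW, h.1, h.2.1, h.2.2.1, h.2.2.2.1, h.2.2.2.2]

theorem pv_step_eq (D : PySem.Dict String Int) (s : Int) (key : String) :
    (let s := if key = "Very Easy" then s + D.getD key 0 * 5 else s
     let s := if key = "Easy" then s + D.getD key 0 * 10 else s
     let s := if key = "Medium" then s + D.getD key 0 * 20 else s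
     let s := if key = "Hard" then s + D.getD key 0 * 40 else s
     let s := if key = "Very Hard" then s + D.getD key 0 * 80 else s
     s) = s + D.getD key 0 * pvW key := by
  by_cases h1 : key = "Very Easy" <;> by_cases h2 : key = "Easy" <;>
    by_cases h3 : key = "Medium" <;> by_cases h4 : key = "Hard" <;>
    by_cases h5 : key = "Very Hard" <;> simp_all [pvW]

theorem pv_foldl_sum (f : String → Int) (L : List String) (init : Int) :
    L.foldl (fun s k => s + f k) init = init + (L.map f).sum := by
  induction L generalizing init with
  | nil => simp
  | cons k t ih => simp [List.foldl, ih, add_assoc]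

theorem pv_getD_eq_zero {d : List (String × Int)} {k : String}
    (h : k ∉ d.map Prod.fst) : (PySem.Dict.mk d).getD k 0 = 0 := by
  apply PySem.Dict.getD_of_get?_eq_none
  rw [PySem.Dict.get?_eq_none_iff_not_mem_keys]
  simpa [PySem.Dict.keys] using h

theorem pv_sum_eq (d : List (String × Int)) :
    ((PySem.List.dedup (d.map Prod.fst)).map
        (fun k => (PySem.Dict.mk d).getD k 0 * pvW k)).sum =
      (pvLEVELS.map (fun k => (PySem.Dict.mk d).getD k 0 * pvW k)).sum := by
  set f : String → Int := fun k => (PySem.Dict.mk d).getD k 0 * pvW k with hf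
  set L : List String := PySem.List.dedup (d.map Prod.fst) with hL
  have hLnd : L.Nodup := PySem.List.nodup_dedup _
  have hNnd : pvLEVELS.Nodup := by decide
  rw [← List.sum_toFinset f hLnd, ← List.sum_toFinset f hNnd]
  have h1 : L.toFinset.sum f = (L.toFinset ∪ pvLEVELS.toFinset).sum f := by
    apply Finset.sum_subset Finset.subset_union_left
    intro x _ hx
    have hxL : x ∉ L := by simpa using hx
    have hxd : x ∉ d.map Prod.fst := by
      intro hm
      exact hxL (by simpa [hL, PySem.List.mem_dedup] using hm)
    simp [pv_getD_eq_zero hxd]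
  have h2 : pvLEVELS.toFinset.sum f = (L.toFinset ∪ pvLEVELS.toFinset).sum f := by
    apply Finset.sum_subset Finset.subset_union_right
    intro x _ hx
    have hxN : x ∉ pvLEVELS := by simpa using hx
    simp [pvW_eq_zero hxN]
  rw [h1, h2]

-- ===== VERDICT (by name: the statement is the Claim_ definition above) =====
theorem get_xp_spec : Claim_equal_get_xp := by
  intro d _
  unfold Spec_get_xp get_xp get_xp_alt
  have hA : (PySem.List.dedup (d.map Prod.fst)).foldl (fun sum_xp key =>
      let sum_xp := if key = "Very Easy" then sum_xp + (PySem.Dict.mk d).getD key 0 * 5 else sum_xp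
      let sum_xp := if key = "Easy" then sum_xp + (PySem.Dict.mk d).getD key 0 * 10 else sum_xp
      let sum_xp := if key = "Medium" then sum_xp + (PySem.Dict.mk d).getD key 0 * 20 else sum_xp
      let sum_xp := if key = "Hard" then sum_xp + (PySem.Dict.mk d).getD key 0 * 40 else sum_xp
      let sum_xp := if key = "Very Hard" then sum_xp + (PySem.Dict.mk d).getD key 0 * 80 else sum_xp
      sum_xp) 0
      = ((PySem.List.dedup (d.map Prod.fst)).map
          (fun k => (PySem.Dict.mk d).getD k 0 * pvW k)).sum := by
    have := pv_foldl_sum (fun k => (PySem.Dict.mk d).getD k 0 * pvW k)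
      (PySem.List.dedup (d.map Prod.fst)) 0
    simp only [zero_add] at this
    rw [← this]
    apply PySem.List.foldl_congr_mem
    intro s k _
    exact pv_step_eq (PySem.Dict.mk d) s k
  have hB : 5 * pvHorner d pvLEVELS
      = (pvLEVELS.map (fun k => (PySem.Dict.mk d).getD k 0 * pvW k)).sum := by
    simp [pvHorner, pvLEVELS, pvW]
    ring
  simp only [hA, hB, pv_sum_eq d]
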